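-- pv_equiv track=rewrite | github.com/JJayeee/Algorithm | CodingTest/11st_01.py | solution
-- ===== SOURCE A (Python) =====
-- def solution(S):
--     cnt = 0
--     result_cnt = 0
--     for s in S:
--         if s == 'a':
--             cnt += 1
--             if cnt == 3:
--                 result_cnt = -1
--                 break
--         else:
--             if cnt == 2:
--                 pass
--             elif cnt == 1:
--                 result_cnt += 1
--             else:
--                 result_cnt += 2
--
--             cnt = 0
--     else:
--         if cnt == 1:
--             result_cnt += 1
--         elif cnt == 2:
--             pass
--         else:
--             result_cnt += 2
--
--
--     return result_cnt
-- ===== SOURCE B (Python) =====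
-- def solution(S):
--     # Closed form: each 'a'-free char costs 2, each 'a' saves 3 relative to that,
--     # plus a constant 2; three consecutive 'a's make the task impossible.
--     if 'aaa' in S:
--         return -1
--     return 2 * len(S) - 3 * sum(c == 'a' for c in S) + 2
-- ===== Notes on version B (the rewrite author's own statement) =====
-- stated objective: simpler
-- what changed: Replaced A's per-character counter/accumulator loop (with break and for-else epilogue) by a closed form: -1 iff 'aaa' occurs in S, otherwise 2*len(S) - 3*count('a') + 2.
import Mathlib
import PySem

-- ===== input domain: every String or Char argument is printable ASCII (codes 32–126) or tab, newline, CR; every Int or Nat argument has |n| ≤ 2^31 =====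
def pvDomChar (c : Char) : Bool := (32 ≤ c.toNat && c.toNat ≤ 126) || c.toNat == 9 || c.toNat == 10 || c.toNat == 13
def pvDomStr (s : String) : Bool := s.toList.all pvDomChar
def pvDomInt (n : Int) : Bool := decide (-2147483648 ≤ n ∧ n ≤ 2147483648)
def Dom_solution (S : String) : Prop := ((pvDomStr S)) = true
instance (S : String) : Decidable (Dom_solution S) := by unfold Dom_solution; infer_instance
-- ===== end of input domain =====

-- B replaces A's per-character counter loop by a closed form: -1 iff 'aaa' occurs in S,
-- else 2*len(S) - 3*(number of 'a') + 2 (objective: simpler).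

-- ===== PORT A =====
-- the for-loop of A: state (cnt, result_cnt); the [] case is the for-else epilogue
def solLoop : List Char → Int → Int → Int
  | [], cnt, res =>
    if cnt = 1 then res + 1
    else if cnt = 2 then res
    else res + 2
  | c :: rest, cnt, res =>
    if c = 'a' then
      if cnt + 1 = 3 then -1        -- break with result_cnt = -1
      else solLoop rest (cnt + 1) res
    else
      if cnt = 2 then solLoop rest 0 res
      else if cnt = 1 then solLoop rest 0 (res + 1)
      else solLoop rest 0 (res + 2)

def solution (S : String) : Int := solLoop S.toList 0 0

-- ===== PORT B =====
def solution_alt (S : String) : Int :=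
  if PySem.Str.isIn "aaa" S then -1
  else 2 * PySem.Str.len S - 3 * (S.toList.count 'a' : Int) + 2

-- ===== PRECONDITION & SPEC =====
def Spec_solution (S : String) (out : Int) : Prop := out = solution_alt S
instance (S : String) (out : Int) : Decidable (Spec_solution S out) := by unfold Spec_solution; infer_instance

-- ===== CLAIM (what is proved, stated in full; the proofs are below) =====
def Claim_equal_solution : Prop := ∀ (S : String), Dom_solution S → Spec_solution S (solution S)

-- ===== LEMMAS AND PROOFS =====

-- the run of 'a's still needed to reach three, given cnt trailing 'a's already counted
def pendingRun (cnt : Int) : List Char :=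
  if cnt = 1 then ['a', 'a'] else if cnt = 2 then ['a'] else ['a', 'a', 'a']

theorem solLoop_cons_a (rest : List Char) (cnt res : Int) :
    solLoop ('a' :: rest) cnt res = if cnt + 1 = 3 then -1 else solLoop rest (cnt + 1) res := by
  simp [solLoop]

theorem solLoop_cons_not_a {c : Char} (hc : c ≠ 'a') (rest : List Char) (cnt res : Int) :
    solLoop (c :: rest) cnt res =
      if cnt = 2 then solLoop rest 0 res
      else if cnt = 1 then solLoop rest 0 (res + 1)
      else solLoop rest 0 (res + 2) := by
  simp [solLoop, hc]

theorem not_a_cons_prefix {c : Char} (hc : c ≠ 'a') (t rest : List Char) :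
    ¬ ('a' :: t <+: c :: rest) := fun hp => hc ((List.cons_prefix_cons.mp hp).1.symm)

-- invariant of A's loop: with cnt ∈ {0,1,2} trailing 'a's already counted, the loop returns
-- -1 exactly when the pending run is completed or 'aaa' occurs later, else the closed form
theorem solLoop_eq (l : List Char) : ∀ (cnt res : Int), (cnt = 0 ∨ cnt = 1 ∨ cnt = 2) →
    solLoop l cnt res =
      if (pendingRun cnt <+: l ∨ ['a', 'a', 'a'] <:+: l)
      then -1
      else res + 2 * (l.length : Int) - 3 * (l.count 'a' : Int) + 2 - cnt := by
  induction l with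
  | nil =>
    intro cnt res h
    have hnp : ¬ (pendingRun cnt <+: ([] : List Char) ∨ ['a','a','a'] <:+: ([] : List Char)) := by
      rintro (hp | hi)
      · rcases h with h | h | h <;> subst h <;> simp [pendingRun] at hp
      · simp at hi
    rw [if_neg hnp]
    rcases h with h | h | h <;> subst h
    · simp [solLoop]
    · simp [solLoop]; omega
    · simp [solLoop]
  | cons c rest ih =>
    intro cnt res h
    by_cases hc : c = 'a'
    · subst hc
      rcases h with h | h | h <;> subst h
      · -- cnt = 0
        rw [solLoop_cons_a, if_neg (by norm_num), show (0:Int) + 1 = 1 from by norm_num, ih 1 res (by omega)]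
        have hcond : (pendingRun 1 <+: rest ∨ ['a','a','a'] <:+: rest) ↔
            (pendingRun 0 <+: 'a' :: rest ∨ ['a','a','a'] <:+: 'a' :: rest) := by
          simp only [pendingRun]
          norm_num
          rw [List.infix_cons_iff (a := 'a'),
            show (['a','a','a'] : List Char) <+: 'a' :: rest ↔ ['a','a'] <+: rest from
              by rw [List.cons_prefix_cons]; simp]
          tauto
        rw [if_congr hcond rfl rfl]
        split_ifs with hif
        · rfl
        · simp
          ring
      · -- cnt = 1
        rw [solLoop_cons_a, if_neg (by norm_num), show (1:Int) + 1 = 2 from by norm_num, ih 2 res (by omega)]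
        have hcond : (pendingRun 2 <+: rest ∨ ['a','a','a'] <:+: rest) ↔
            (pendingRun 1 <+: 'a' :: rest ∨ ['a','a','a'] <:+: 'a' :: rest) := by
          simp only [pendingRun]
          norm_num
          rw [List.infix_cons_iff (a := 'a'),
            show (['a','a','a'] : List Char) <+: 'a' :: rest ↔ ['a','a'] <+: rest from
              by rw [List.cons_prefix_cons]; simp]
          have haux : (['a','a'] : List Char) <+: rest → (['a'] : List Char) <+: rest :=
            fun hp => List.IsPrefix.trans (by simp [List.cons_prefix_cons]) hp
          tauto
        rw [if_congr hcond rfl rfl]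
        split_ifs with hif
        · rfl
        · simp
          ring
      · -- cnt = 2 : the break; this 'a' completes the pending run ['a']
        rw [solLoop_cons_a, if_pos (by norm_num),
          if_pos (Or.inl (by simp [pendingRun, List.cons_prefix_cons]))]
    · -- c ≠ 'a' : cnt resets to 0, result grows by 2 - cnt
      have hcond : ∀ cnt' : Int, (pendingRun 0 <+: rest ∨ ['a','a','a'] <:+: rest) ↔
          (pendingRun cnt' <+: c :: rest ∨ ['a','a','a'] <:+: c :: rest) := by
        intro cnt'
        have hpr : ∃ t, pendingRun cnt' = 'a' :: t := by
          unfold pendingRun; split_ifs <;> exact ⟨_, rfl⟩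
        obtain ⟨t, hpt⟩ := hpr
        constructor
        · rintro (hp | hi)
          · exact Or.inr (List.infix_cons ((show pendingRun 0 = ['a','a','a'] from rfl) ▸ hp).isInfix)
          · exact Or.inr (List.infix_cons hi)
        · rintro (hp | hi)
          · exact absurd hp (hpt ▸ not_a_cons_prefix hc t rest)
          · rcases List.infix_cons_iff.mp hi with hp' | hi'
            · exact absurd hp' (not_a_cons_prefix hc _ rest)
            · exact Or.inr hi'
      have hcount : (((c :: rest).count 'a' : Nat) : Int) = ((rest.count 'a' : Nat) : Int) := by
        simp [hc]
      rcases h with h | h | h <;> subst h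
      · rw [solLoop_cons_not_a hc, if_neg (by norm_num), if_neg (by norm_num),
          ih 0 (res + 2) (by omega), if_congr (hcond 0) rfl rfl]
        split_ifs with hif
        · rfl
        · rw [List.length_cons]; rw [hcount]; push_cast; ring
      · rw [solLoop_cons_not_a hc, if_neg (by norm_num), if_pos rfl,
          ih 0 (res + 1) (by omega), if_congr (hcond 1) rfl rfl]
        split_ifs with hif
        · rfl
        · rw [List.length_cons]; rw [hcount]; push_cast; ring
      · rw [solLoop_cons_not_a hc, if_pos rfl,
          ih 0 res (by omega), if_congr (hcond 2) rfl rfl]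
        split_ifs with hif
        · rfl
        · rw [List.length_cons]; rw [hcount]; push_cast; ring

theorem solution_eq_closed (S : String) :
    solution S = if (['a','a','a'] <:+: S.toList) then -1
      else 2 * (S.toList.length : Int) - 3 * (S.toList.count 'a' : Int) + 2 := by
  unfold solution
  rw [solLoop_eq S.toList 0 0 (by omega)]
  have hcond : (pendingRun 0 <+: S.toList ∨ ['a','a','a'] <:+: S.toList) ↔
      (['a','a','a'] <:+: S.toList) := by
    constructor
    · rintro (hp | hi)
      · exact ((show pendingRun 0 = ['a','a','a'] from rfl) ▸ hp).isInfix
      · exact hi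
    · exact Or.inr
  rw [if_congr hcond rfl rfl]
  split_ifs with hif
  · rfl
  · ring

-- ===== VERDICT (by name: the statement is the Claim_ definition above) =====
theorem solution_spec : Claim_equal_solution := by
  intro S _
  unfold Spec_solution solution_alt
  rw [solution_eq_closed S, PySem.Str.len_eq]
  by_cases h : ['a','a','a'] <:+: S.toList
  · rw [if_pos h, if_pos ((PySem.Str.isIn_iff_infix "aaa" S).mpr (by simpa using h))]
  · rw [if_neg h, if_neg (by
      intro hin
      exact h (by simpa using (PySem.Str.isIn_iff_infix "aaa" S).mp hin))]
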